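-- pv_equiv track=rewrite | github.com/CarlosDLMC/MBID_CF_Herramientas_de_Programacion | ejercicios_a_entregar/practica_1.py | nuevo_string
-- ===== SOURCE A (Python) =====
-- class NoWordException(Exception):
--     pass
--
-- class NegativeNumberException(Exception):
--     pass
--
-- def nuevo_string(palabra, multiplicador_de_vocales):
--     if not palabra:
--         raise NoWordException("¡ERROR! Necesitas escribir una palabra")
--     if multiplicador_de_vocales < 0:
--         raise NegativeNumberException("¡ERROR! Tienes que introducir un número positivo")
--     nueva_palabra = ""
--     vocales = "aeiouAEIOU"
--     for letra in palabra:
--         if letra in vocales: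
--             nueva_palabra += multiplicador_de_vocales * letra
--         else:
--             nueva_palabra += letra
--     return nueva_palabra
-- ===== SOURCE B (Python) =====
-- class NoWordException(Exception):
--     pass
--
-- class NegativeNumberException(Exception):
--     pass
--
-- def nuevo_string(palabra, multiplicador_de_vocales):
--     if not palabra:
--         raise NoWordException("¡ERROR! Necesitas escribir una palabra")
--     if multiplicador_de_vocales < 0:
--         raise NegativeNumberException("¡ERROR! Tienes que introducir un número positivo")
--     tabla = {ord(v): multiplicador_de_vocales * v for v in "aeiouAEIOU" if v in palabra}
--     return palabra.translate(tabla)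
-- ===== Notes on version B (the rewrite author's own statement) =====
-- stated objective: idiomatic
-- what changed: Replaces the per-character branch-and-concatenate loop with a precomputed ordinal-to-string translation table (built only for vowels occurring in the word) consumed by str.translate.
import Mathlib
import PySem

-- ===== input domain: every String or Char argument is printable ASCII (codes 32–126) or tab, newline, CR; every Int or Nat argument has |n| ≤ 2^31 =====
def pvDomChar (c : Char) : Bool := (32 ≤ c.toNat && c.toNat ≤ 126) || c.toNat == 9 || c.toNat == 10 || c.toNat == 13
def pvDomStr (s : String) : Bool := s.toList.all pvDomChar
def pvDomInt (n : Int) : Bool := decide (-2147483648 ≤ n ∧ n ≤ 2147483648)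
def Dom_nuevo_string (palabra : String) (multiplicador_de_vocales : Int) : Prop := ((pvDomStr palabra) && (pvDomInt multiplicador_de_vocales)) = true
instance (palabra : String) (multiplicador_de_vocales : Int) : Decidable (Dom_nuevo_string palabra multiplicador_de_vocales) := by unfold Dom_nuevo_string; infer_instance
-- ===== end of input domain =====

-- B replaces A's per-character branch-and-append loop by a precomputed ordinal→string
-- translation table consumed by a translate-style map (idiomatic; same cost).

-- ===== PORT A =====
-- vocales = "aeiouAEIOU", kept as its character list
def vocales : List Char := ['a', 'e', 'i', 'o', 'u', 'A', 'E', 'I', 'O', 'U']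

-- per-character loop: append the (possibly repeated) letter to the accumulator
def nuevo_string (palabra : String) (multiplicador_de_vocales : Int) : String :=
  String.mk (palabra.toList.foldl
    (fun nueva_palabra letra =>
      if letra ∈ vocales then
        nueva_palabra ++ List.replicate multiplicador_de_vocales.toNat letra
      else
        nueva_palabra ++ [letra])
    [])

-- ===== PORT B =====
-- tabla = {ord(v): multiplicador_de_vocales * v for v in "aeiouAEIOU" if v in palabra}
def pvTabla (palabra : String) (multiplicador_de_vocales : Int) : PySem.Dict Nat (List Char) :=
  (vocales.filter (fun v => v ∈ palabra.toList)).foldl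
    (fun d v => d.insert v.toNat (List.replicate multiplicador_de_vocales.toNat v))
    PySem.Dict.empty

-- palabra.translate(tabla): each char is replaced by its table entry, or kept
def nuevo_string_alt (palabra : String) (multiplicador_de_vocales : Int) : String :=
  String.mk (palabra.toList.flatMap
    (fun c => ((pvTabla palabra multiplicador_de_vocales).get? c.toNat).getD [c]))

-- ===== PRECONDITION & SPEC =====
-- Pre_ excludes exactly the inputs where Python A raises: the empty word (NoWordException)
-- and a negative multiplier (NegativeNumberException).
def Pre_nuevo_string (palabra : String) (multiplicador_de_vocales : Int) : Prop :=
  palabra ≠ "" ∧ 0 ≤ multiplicador_de_vocales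
instance (palabra : String) (multiplicador_de_vocales : Int) : Decidable (Pre_nuevo_string palabra multiplicador_de_vocales) := by unfold Pre_nuevo_string; infer_instance

def pvWitness_nuevo_string : String × Int := ("hola", 2)

def Spec_nuevo_string (palabra : String) (multiplicador_de_vocales : Int) (out : String) : Prop := out = nuevo_string_alt palabra multiplicador_de_vocales
instance (palabra : String) (multiplicador_de_vocales : Int) (out : String) : Decidable (Spec_nuevo_string palabra multiplicador_de_vocales out) := by unfold Spec_nuevo_string; infer_instance

-- ===== CLAIM (what is proved, stated in full; the proofs are below) =====
def Claim_equal_nuevo_string : Prop := ∀ (palabra : String) (multiplicador_de_vocales : Int), Dom_nuevo_string palabra multiplicador_de_vocales → Pre_nuevo_string palabra multiplicador_de_vocales → Spec_nuevo_string palabra multiplicador_de_vocales (nuevo_string palabra multiplicador_de_vocales)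

-- ===== LEMMAS AND PROOFS =====

theorem pv_charToNat_inj (c v : Char) (h : c.toNat = v.toNat) : c = v := by
  apply Char.ext
  exact UInt32.toNat_inj.mp h

-- lookup in a dict built by inserting v.toNat ↦ g v for v along l
theorem pv_get?_foldl_insert (g : Char → List Char) (c : Char) (l : List Char)
    (d : PySem.Dict Nat (List Char)) :
    ((l.foldl (fun d v => d.insert v.toNat (g v)) d).get? c.toNat) =
    if c ∈ l then some (g c) else d.get? c.toNat := by
  induction l using List.reverseRecOn generalizing d with
  | nil => simp
  | append_singleton l v ih =>
    rw [List.foldl_append]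
    simp only [List.foldl]
    rw [PySem.Dict.get?_insert]
    by_cases hcv : c = v
    · subst hcv; simp
    · rw [if_neg (fun hn => hcv (pv_charToNat_inj c v hn)), ih]
      simp [List.mem_append, hcv]

-- for a character of the word, the table lookup computes exactly A's per-character branch
theorem pv_tabla_getD (palabra : String) (m : Int) (c : Char) (hc : c ∈ palabra.toList) :
    (((pvTabla palabra m).get? c.toNat).getD [c]) =
    if c ∈ vocales then List.replicate m.toNat c else [c] := by
  unfold pvTabla
  rw [pv_get?_foldl_insert]
  by_cases h : c ∈ vocales
  · simp [List.mem_filter, h, hc]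
  · simp [List.mem_filter, h]

-- ===== VERDICT (by name: the statement is the Claim_ definition above) =====
theorem nuevo_string_spec : Claim_equal_nuevo_string := by
  intro palabra m _ _
  unfold Spec_nuevo_string nuevo_string nuevo_string_alt
  have hf : (fun (acc : List Char) (letra : Char) =>
      if letra ∈ vocales then acc ++ List.replicate m.toNat letra
      else acc ++ [letra]) =
      (fun acc letra => acc ++
        (if letra ∈ vocales then List.replicate m.toNat letra else [letra])) := by
    funext acc letra
    exact (apply_ite (acc ++ ·) _ _ _).symm
  rw [hf, PySem.List.foldl_append_eq_flatMap, List.nil_append]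
  refine congrArg String.mk ?_
  apply List.flatMap_congr
  intro c hc
  exact (pv_tabla_getD palabra m c hc).symm
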